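-- pv_equiv track=rewrite | github.com/22-23-Intro-Programming/hungryMemory | 2022.10.26_loops_n_lists_python_practice.py | addthenumbersbutnotafterzero
-- ===== SOURCE A (Python) =====
-- def addthenumbersbutnotafterzero(list_o_nums):
--     total = 0
--     i = 0
--     while(i < len(list_o_nums)):
--         if(list_o_nums[i] != 0):
--             total += list_o_nums[i]
--             i += 1
--         else:
--             return(total)
--     return(total)
-- ===== SOURCE B (Python) =====
-- def addthenumbersbutnotafterzero(list_o_nums):
--     if 0 in list_o_nums:
--         idx = list_o_nums.index(0)
--         return sum(list_o_nums[:idx])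
--     return sum(list_o_nums)
-- ===== Notes on version B (the rewrite author's own statement) =====
-- stated objective: idiomatic
-- what changed: Replaces the index-based while loop with early return by a find-cutoff-then-reduce decomposition: locate the first zero with 'in'/'index' and sum the slice before it.
import Mathlib
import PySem

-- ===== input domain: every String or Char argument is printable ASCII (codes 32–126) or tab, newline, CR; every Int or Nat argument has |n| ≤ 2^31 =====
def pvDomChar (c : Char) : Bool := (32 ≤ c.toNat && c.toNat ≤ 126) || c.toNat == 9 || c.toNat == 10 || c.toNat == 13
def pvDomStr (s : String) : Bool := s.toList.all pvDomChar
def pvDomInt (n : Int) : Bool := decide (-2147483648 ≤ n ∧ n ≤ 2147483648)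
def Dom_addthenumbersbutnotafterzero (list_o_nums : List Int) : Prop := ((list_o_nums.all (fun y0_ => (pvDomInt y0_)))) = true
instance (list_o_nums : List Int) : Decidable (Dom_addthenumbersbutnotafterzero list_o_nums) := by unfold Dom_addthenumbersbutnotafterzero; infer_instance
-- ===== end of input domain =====

-- B replaces A's index while-loop (sum until first zero, early return) by find-the-cutoff-then-sum; same values, similar cost.
-- ===== PORT A =====
-- while loop over state (total, remaining suffix): if head ≠ 0 add and advance, else return total
def addthenumbersbutnotafterzeroGo : List Int → Int → Int
  | [], total => total
  | x :: rest, total => if x ≠ 0 then addthenumbersbutnotafterzeroGo rest (total + x) else total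

def addthenumbersbutnotafterzero (list_o_nums : List Int) : Int :=
  addthenumbersbutnotafterzeroGo list_o_nums 0

-- ===== PORT B =====
def addthenumbersbutnotafterzero_alt (list_o_nums : List Int) : Int :=
  if list_o_nums.contains 0 then
    match PySem.List.index? list_o_nums 0 with
    | some idx => (PySem.List.slice list_o_nums none (some (idx : Int))).sum
    | none => list_o_nums.sum   -- unreachable: 0 ∈ list
  else
    list_o_nums.sum

-- ===== PRECONDITION & SPEC =====
def Spec_addthenumbersbutnotafterzero (list_o_nums : List Int) (out : Int) : Prop := out = addthenumbersbutnotafterzero_alt list_o_nums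
instance (list_o_nums : List Int) (out : Int) : Decidable (Spec_addthenumbersbutnotafterzero list_o_nums out) := by unfold Spec_addthenumbersbutnotafterzero; infer_instance

-- ===== CLAIM (what is proved, stated in full; the proofs are below) =====
def Claim_equal_addthenumbersbutnotafterzero : Prop := ∀ (list_o_nums : List Int), Dom_addthenumbersbutnotafterzero list_o_nums → Spec_addthenumbersbutnotafterzero list_o_nums (addthenumbersbutnotafterzero list_o_nums)

-- ===== LEMMAS AND PROOFS =====

-- ===== VERDICT (by name: the statement is the Claim_ definition above) =====
lemma altRec (x : Int) (rest : List Int) (hx : x ≠ 0) :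
    addthenumbersbutnotafterzero_alt (x :: rest) = x + addthenumbersbutnotafterzero_alt rest := by
  unfold addthenumbersbutnotafterzero_alt
  rw [PySem.List.index?_cons_of_ne rest hx]
  by_cases h0 : rest.contains 0
  · simp only [List.contains_cons, h0, Bool.or_true]
    rcases (Option.isSome_iff_exists.mp
      ((PySem.List.index?_isSome_iff rest 0).mpr (by simpa using h0))) with ⟨k, hk⟩
    rw [hk]
    simp [PySem.List.slice_to_natCast]
    have : ((k : Int) + 1) = ((k + 1 : Nat) : Int) := by push_cast; ring
    rw [this, PySem.List.slice_to_natCast]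
    simp [List.take_succ_cons]
  · have hmem : (0 : Int) ∉ rest := by simpa using h0
    simp [Ne.symm hx, hmem]

lemma goEq (l : List Int) : ∀ total : Int,
    addthenumbersbutnotafterzeroGo l total = total + addthenumbersbutnotafterzero_alt l := by
  induction l with
  | nil => intro total; simp [addthenumbersbutnotafterzeroGo, addthenumbersbutnotafterzero_alt]
  | cons x rest ih =>
    intro total
    by_cases hx : x = 0
    · subst hx
      unfold addthenumbersbutnotafterzeroGo addthenumbersbutnotafterzero_alt
      rw [PySem.List.index?_cons_self]
      simp [PySem.List.slice]
    · rw [show addthenumbersbutnotafterzeroGo (x :: rest) total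
            = addthenumbersbutnotafterzeroGo rest (total + x) from by
          simp [addthenumbersbutnotafterzeroGo, hx], ih, altRec x rest hx]
      ring

-- ===== VERDICT (by name: the statement is the Claim_ definition above) =====
theorem addthenumbersbutnotafterzero_spec : Claim_equal_addthenumbersbutnotafterzero := by
  intro l _
  unfold Spec_addthenumbersbutnotafterzero addthenumbersbutnotafterzero
  rw [goEq]; ring
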